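-- pv_equiv track=rewrite | github.com/apaslak/advent-of-code | 2019/puzzle_04/alksjdflaksjdf.py | validate_double_digit_iter
-- ===== SOURCE A (Python) =====
-- def validate_double_digit_iter(chars):
--     last_char = chars[0]
--     counter = 1
--     double_found = False
--     for i in range(1, len(chars)):
--         if last_char == chars[i]:
--             counter += 1
--             double_found = True
--             if i == len(chars)-1:
--                 if counter % 2 != 0:
--                     double_found = False
--         else:
--             if counter % 2 == 0 or counter == 1:
--                 counter = 1
--                 last_char = chars[i]
--                 # this is fine
--             else:
--                 double_found = False
--                 break
--
--     return double_found
-- ===== SOURCE B (Python) =====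
-- def validate_double_digit_iter(chars):
--     last = chars[0]  # raises IndexError on empty input, as the original does
--     runs = []
--     count = 1
--     for c in chars[1:]:
--         if c == last:
--             count += 1
--         else:
--             runs.append(count)
--             last = c
--             count = 1
--     runs.append(count)
--     return all(L == 1 or L % 2 == 0 for L in runs) and any(L % 2 == 0 for L in runs)
-- ===== Notes on version B (the rewrite author's own statement) =====
-- stated objective: simpler
-- what changed: Replaces A's single-pass parity/break state machine (counter, double_found flag, mid-loop break, special last-index flip) by first building the list of equal-character run lengths and then returning 'every run length is 1 or even, and some run length is even'.
import Mathlib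
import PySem

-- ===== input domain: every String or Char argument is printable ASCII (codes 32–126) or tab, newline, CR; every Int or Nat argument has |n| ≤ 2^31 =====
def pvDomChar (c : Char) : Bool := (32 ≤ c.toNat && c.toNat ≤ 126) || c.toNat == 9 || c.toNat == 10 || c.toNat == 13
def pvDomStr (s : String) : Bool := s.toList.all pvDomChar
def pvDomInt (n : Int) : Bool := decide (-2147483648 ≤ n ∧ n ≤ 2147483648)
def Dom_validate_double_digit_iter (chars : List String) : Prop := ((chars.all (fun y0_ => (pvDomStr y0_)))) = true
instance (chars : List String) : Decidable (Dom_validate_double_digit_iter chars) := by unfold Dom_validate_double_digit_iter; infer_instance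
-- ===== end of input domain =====

-- B replaces A's single-pass parity/break state machine by building the run-lengths of
-- equal-character runs and checking a two-part predicate over them (objective: simpler).

-- ===== PORT A =====
-- A's for-loop over range(1, len(chars)) with `break`, as structural recursion over the
-- remaining elements; `rest.isEmpty` is exactly `i == len(chars)-1`.
def pvALoop (last_char : String) (counter : Int) (double_found : Bool) :
    List String → Bool
  | [] => double_found
  | c :: rest =>
    if last_char = c then
      let counter := counter + 1
      let double_found := true
      let double_found :=
        if rest.isEmpty then
          (if PySem.Int.mod counter 2 != 0 then false else double_found)
        else double_found
      pvALoop last_char counter double_found rest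
    else
      if PySem.Int.mod counter 2 == 0 || counter == 1 then
        pvALoop c 1 double_found rest
      else false

def validate_double_digit_iter (chars : List String) : Bool :=
  match chars with
  | [] => false          -- chars[0] raises IndexError; excluded by Pre_
  | c0 :: rest => pvALoop c0 1 false rest

-- ===== PORT B =====
def validate_double_digit_iter_alt (chars : List String) : Bool :=
  match chars with
  | [] => false          -- chars[0] raises IndexError; excluded by Pre_
  | c0 :: tail =>
    -- run-length loop of Source B: state (runs, last, count)
    let st := tail.foldl
      (fun (st : List Int × String × Int) c =>
        if c = st.2.1 then (st.1, st.2.1, st.2.2 + 1)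
        else (st.1 ++ [st.2.2], c, 1))
      (([] : List Int), c0, (1 : Int))
    let runs := st.1 ++ [st.2.2]
    (runs.all fun L => L == 1 || PySem.Int.mod L 2 == 0) &&
      (runs.any fun L => PySem.Int.mod L 2 == 0)

-- ===== PRECONDITION & SPEC =====
-- Pre_ excludes only the empty list, on which A (and B) raise IndexError at chars[0].
def Pre_validate_double_digit_iter (chars : List String) : Prop := chars ≠ []
instance (chars : List String) : Decidable (Pre_validate_double_digit_iter chars) := by
  unfold Pre_validate_double_digit_iter; infer_instance

def pvWitness_validate_double_digit_iter : List String := ["a", "a", "b"]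

def Spec_validate_double_digit_iter (chars : List String) (out : Bool) : Prop :=
  out = validate_double_digit_iter_alt chars
instance (chars : List String) (out : Bool) : Decidable (Spec_validate_double_digit_iter chars out) := by
  unfold Spec_validate_double_digit_iter; infer_instance

-- ===== CLAIM (what is proved, stated in full; the proofs are below) =====
def Claim_equal_validate_double_digit_iter : Prop :=
  ∀ (chars : List String), Dom_validate_double_digit_iter chars →
    Pre_validate_double_digit_iter chars →
      Spec_validate_double_digit_iter chars (validate_double_digit_iter chars)

-- ===== LEMMAS AND PROOFS =====

-- run lengths of the segment whose current run is (last, counter) followed by tail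
def pvRuns (last : String) (counter : Int) : List String → List Int
  | [] => [counter]
  | c :: rest =>
    if last = c then pvRuns last (counter + 1) rest
    else counter :: pvRuns c 1 rest

def pvGood (L : Int) : Bool := L == 1 || PySem.Int.mod L 2 == 0
def pvEven (L : Int) : Bool := PySem.Int.mod L 2 == 0

-- no two adjacent equal strings in last :: tail (⇔ every run has length 1)
def pvDistinctAdj : String → List String → Bool
  | _, [] => true
  | x, y :: ys => (x != y) && pvDistinctAdj y ys

lemma pvRuns_head (tail : List String) : ∀ (c : String) (k : Int),
    ∃ j r, 0 ≤ j ∧ pvRuns c k tail = (k + j) :: r := by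
  induction tail with
  | nil => intro c k; exact ⟨0, [], le_rfl, by simp [pvRuns]⟩
  | cons x t ih =>
    intro c k
    by_cases h : c = x
    · subst h
      obtain ⟨j, r, hj, hr⟩ := ih c (k + 1)
      refine ⟨j + 1, r, by omega, ?_⟩
      have e : k + (j + 1) = k + 1 + j := by ring
      rw [e, ← hr]
      simp [pvRuns]
    · exact ⟨0, pvRuns x 1 t, le_rfl, by simp [pvRuns, h]⟩

lemma pvRuns_of_distinct (tail : List String) : ∀ (c : String) (k : Int),
    pvDistinctAdj c tail = true →
    pvRuns c k tail = k :: List.replicate tail.length 1 := by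
  induction tail with
  | nil => intro c k _; simp [pvRuns]
  | cons x t ih =>
    intro c k h
    simp only [pvDistinctAdj, Bool.and_eq_true, bne_iff_ne] at h
    simp [pvRuns, h.1, ih x 1 h.2, List.replicate_succ]

lemma pvEven_one : pvEven 1 = false := by decide

lemma pvGood_eq (k : Int) : pvGood k = ((k == 1) || pvEven k) := rfl

lemma pvGood_one : pvGood 1 = true := by decide

lemma pvCond_eq (k : Int) : (PySem.Int.mod k 2 == 0 || k == 1) = ((k == 1) || pvEven k) :=
  Bool.or_comm _ _

lemma pvGood_of_ge_two (k : Int) (hk : 2 ≤ k) : pvGood k = pvEven k := by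
  rw [pvGood_eq]
  have h1 : (k == 1) = false := by simp; omega
  rw [h1, Bool.false_or]

-- all runs good & none even ⇒ no adjacent equal pair
lemma pvDistinct_of_all_one (tail : List String) : ∀ (c : String) (k : Int), 1 ≤ k →
    (pvRuns c k tail).all pvGood = true → (pvRuns c k tail).any pvEven = false →
    pvDistinctAdj c tail = true := by
  induction tail with
  | nil => intro c k _ _ _; rfl
  | cons x t ih =>
    intro c k hk hall hany
    by_cases h : c = x
    · exfalso
      subst h
      obtain ⟨j, r, hj, hr⟩ := pvRuns_head t c (k + 1)
      have hruns : pvRuns c k (c :: t) = (k + 1 + j) :: r := by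
        rw [← hr]; simp [pvRuns]
      rw [hruns] at hall hany
      simp only [List.all_cons, Bool.and_eq_true] at hall
      simp only [List.any_cons, Bool.or_eq_false_iff] at hany
      have hb := hall.1
      rw [pvGood_of_ge_two _ (by omega)] at hb
      simp [hany.1] at hb
    · have hruns : pvRuns c k (x :: t) = k :: pvRuns x 1 t := by simp [pvRuns, h]
      rw [hruns] at hall hany
      simp only [List.all_cons, Bool.and_eq_true] at hall
      simp only [List.any_cons, Bool.or_eq_false_iff] at hany
      simp [pvDistinctAdj, h, ih x 1 le_rfl hall.2 hany.2]

-- characterisation of A's loop in terms of the run lengths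
lemma pvALoop_eq (tail : List String) : ∀ (last : String) (counter : Int) (df : Bool),
    1 ≤ counter →
    (counter = 1 ∨ ((tail = [] → df = pvEven counter) ∧ (tail ≠ [] → df = true))) →
    pvALoop last counter df tail =
      ((pvRuns last counter tail).all pvGood &&
        ((pvRuns last counter tail).any pvEven || (df && pvDistinctAdj last tail))) := by
  induction tail with
  | nil =>
    intro last counter df hc hinv
    have hdf : counter = 1 ∨ df = pvEven counter := by
      rcases hinv with h | ⟨h, _⟩
      · exact Or.inl h
      · exact Or.inr (h rfl)
    rcases hdf with h | h
    · subst h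
      simp [pvALoop, pvRuns, pvDistinctAdj, pvGood_one, pvEven_one]
    · subst h
      cases he : pvEven counter
      · simp [pvALoop, pvRuns, pvDistinctAdj, he]
      · simp [pvALoop, pvRuns, pvDistinctAdj, he, pvGood_eq]
  | cons c rest ih =>
    intro last counter df hc hinv
    by_cases h : last = c
    · subst h
      have hruns : pvRuns last counter (last :: rest) = pvRuns last (counter + 1) rest := by
        simp [pvRuns]
      have hda : pvDistinctAdj last (last :: rest) = false := by
        simp [pvDistinctAdj]
      cases rest with
      | nil =>
        have hstep : pvALoop last counter df [last] =
            (if PySem.Int.mod (counter + 1) 2 != 0 then false else true) := by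
          simp [pvALoop]
        have hv : (if PySem.Int.mod (counter + 1) 2 != 0 then false else true) =
            pvEven (counter + 1) := by
          show (if !(pvEven (counter + 1)) then false else true) = pvEven (counter + 1)
          cases pvEven (counter + 1) <;> rfl
        rw [hstep, hv, hruns, hda]
        cases he : pvEven (counter + 1) <;>
          simp [pvRuns, he, pvGood_of_ge_two (counter + 1) (by omega)]
      | cons r0 rs =>
        have hstep : pvALoop last counter df (last :: r0 :: rs) =
            pvALoop last (counter + 1) true (r0 :: rs) := by
          simp [pvALoop]
        rw [hstep, ih last (counter + 1) true (by omega)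
            (Or.inr ⟨by simp, fun _ => rfl⟩), hruns, hda]
        simp only [Bool.true_and, Bool.and_false, Bool.or_false]
        cases hall : (pvRuns last (counter + 1) (r0 :: rs)).all pvGood
        · simp
        · cases hany : (pvRuns last (counter + 1) (r0 :: rs)).any pvEven
          · cases hd : pvDistinctAdj last (r0 :: rs)
            · simp
            · exfalso
              rw [pvRuns_of_distinct _ last (counter + 1) hd] at hall hany
              simp only [List.all_cons, Bool.and_eq_true] at hall
              have hg := hall.1
              rw [pvGood_of_ge_two _ (by omega)] at hg
              simp [List.any_cons, hg] at hany
          · simp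
    · have hruns : pvRuns last counter (c :: rest) = counter :: pvRuns c 1 rest := by
        simp [pvRuns, h]
      have hda : pvDistinctAdj last (c :: rest) = pvDistinctAdj c rest := by
        have hne : (last != c) = true := by simpa using h
        simp [pvDistinctAdj, hne]
      cases hcond : (PySem.Int.mod counter 2 == 0 || counter == 1)
      · have hstep : pvALoop last counter df (c :: rest) = false := by
          simp only [pvALoop, if_neg h, hcond]
          simp
        have hgc : pvGood counter = false := by
          rw [pvGood_eq, ← pvCond_eq, hcond]
        rw [hstep, hruns]
        simp [List.all_cons, hgc]
      · have hstep : pvALoop last counter df (c :: rest) = pvALoop c 1 df rest := by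
          simp only [pvALoop, if_neg h, hcond]
          simp
        have hgc : pvGood counter = true := by
          rw [pvGood_eq, ← pvCond_eq, hcond]
        rw [hstep, ih c 1 df le_rfl (Or.inl rfl), hruns, hda]
        simp only [List.all_cons, List.any_cons, hgc, Bool.true_and]
        cases h1 : (counter == 1)
        · have he : pvEven counter = true := by
            have h' : ((counter == 1) || pvEven counter) = true := by
              rw [← pvCond_eq, hcond]
            simpa [h1] using h'
          have hdf : df = true := by
            rcases hinv with h' | ⟨_, h2⟩
            · exact absurd h' (by simpa using h1)
            · exact h2 (by simp)
          subst hdf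
          rw [he]
          simp only [Bool.true_or, Bool.true_and]
          cases hall : (pvRuns c 1 rest).all pvGood
          · simp
          · cases hany : (pvRuns c 1 rest).any pvEven
            · simp [pvDistinct_of_all_one rest c 1 le_rfl hall hany]
            · simp
        · have hc1 : counter = 1 := by simpa using h1
          subst hc1
          simp [pvEven_one]

-- B's fold builds exactly acc ++ pvRuns last count tail
def pvBStep (st : List Int × String × Int) (c : String) : List Int × String × Int :=
  if c = st.2.1 then (st.1, st.2.1, st.2.2 + 1) else (st.1 ++ [st.2.2], c, 1)

lemma pvBFold_eq (tail : List String) : ∀ (acc : List Int) (last : String) (count : Int),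
    (tail.foldl pvBStep (acc, last, count)).1 ++ [(tail.foldl pvBStep (acc, last, count)).2.2] =
      acc ++ pvRuns last count tail := by
  induction tail with
  | nil => intro acc last count; simp [pvRuns]
  | cons c rest ih =>
    intro acc last count
    by_cases h : c = last
    · rw [List.foldl_cons,
        show pvBStep (acc, last, count) c = (acc, last, count + 1) from by simp [pvBStep, h],
        ih]
      have h' : last = c := h.symm
      simp [pvRuns, h']
    · rw [List.foldl_cons,
        show pvBStep (acc, last, count) c = (acc ++ [count], c, 1) from by simp [pvBStep, h],
        ih]
      have hne : ¬ last = c := fun h' => h h'.symm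
      simp [pvRuns, hne]

lemma pvAlt_eq (c0 : String) (tail : List String) :
    validate_double_digit_iter_alt (c0 :: tail) =
      ((pvRuns c0 1 tail).all pvGood && (pvRuns c0 1 tail).any pvEven) := by
  have hstep : (fun (st : List Int × String × Int) c =>
      if c = st.2.1 then (st.1, st.2.1, st.2.2 + 1)
      else (st.1 ++ [st.2.2], c, 1)) = pvBStep := by
    funext st c; rfl
  have h := pvBFold_eq tail [] c0 1
  rw [List.nil_append] at h
  simp only [validate_double_digit_iter_alt, hstep]
  rw [h]
  rfl

-- ===== VERDICT (by name: the statement is the Claim_ definition above) =====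
theorem validate_double_digit_iter_spec : Claim_equal_validate_double_digit_iter := by
  intro chars _ hpre
  unfold Spec_validate_double_digit_iter
  match chars with
  | [] => exact absurd rfl hpre
  | c0 :: tail =>
    rw [pvAlt_eq]
    show pvALoop c0 1 false tail = _
    rw [pvALoop_eq tail c0 1 false le_rfl (Or.inl rfl)]
    simp
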